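-- pv_equiv track=rewrite | github.com/linovallejo/LFP_PY2_9017323 | principal.py | estado6ValidoTokenEntero
-- ===== SOURCE A (Python) =====
-- def estado6ValidoTokenEntero(lexema):
--     valido = False
--     for i in range(0, len(lexema), 1):
--         if (lexema[i].isdigit()):
--             valido = True
--         else:
--             break
--     return valido
-- ===== SOURCE B (Python) =====
-- def estado6ValidoTokenEntero(lexema):
--     return bool(lexema) and lexema[0].isdigit()
-- ===== Notes on version B (the rewrite author's own statement) =====
-- stated objective: simpler
-- what changed: The scan-with-break loop is replaced by a closed-form test of just the first character (empty string short-circuits to False), since the loop's result only ever depends on lexema[0].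
import Mathlib
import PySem

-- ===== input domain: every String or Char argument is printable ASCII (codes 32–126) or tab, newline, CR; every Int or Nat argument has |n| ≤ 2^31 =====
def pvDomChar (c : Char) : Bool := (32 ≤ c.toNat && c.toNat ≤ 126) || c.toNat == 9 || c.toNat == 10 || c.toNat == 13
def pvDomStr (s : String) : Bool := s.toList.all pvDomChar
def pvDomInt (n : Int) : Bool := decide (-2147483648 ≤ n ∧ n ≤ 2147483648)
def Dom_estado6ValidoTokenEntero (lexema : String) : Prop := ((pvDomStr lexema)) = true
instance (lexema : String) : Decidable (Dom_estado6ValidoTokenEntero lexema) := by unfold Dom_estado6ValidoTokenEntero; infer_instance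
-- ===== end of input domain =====

-- B replaces A's scan-with-break loop by a single test of the first character; objective: simpler.

-- ===== PORT A =====
-- A's for-loop over range(0, len(lexema), 1): each step tests lexema[i].isdigit(),
-- setting valido := True or breaking (returning the current valido).
def pvLoopA : List Char → Bool → Bool
  | [], valido => valido
  | c :: rest, valido =>
      if PySem.Chars.isdigit c then pvLoopA rest true else valido

def estado6ValidoTokenEntero (lexema : String) : Bool :=
  pvLoopA lexema.toList false

-- ===== PORT B =====
def estado6ValidoTokenEntero_alt (lexema : String) : Bool :=
  match lexema.toList with
  | [] => false
  | c :: _ => PySem.Chars.isdigit c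

-- ===== PRECONDITION & SPEC =====
def Spec_estado6ValidoTokenEntero (lexema : String) (out : Bool) : Prop := out = estado6ValidoTokenEntero_alt lexema
instance (lexema : String) (out : Bool) : Decidable (Spec_estado6ValidoTokenEntero lexema out) := by unfold Spec_estado6ValidoTokenEntero; infer_instance

-- ===== CLAIM (what is proved, stated in full; the proofs are below) =====
def Claim_equal_estado6ValidoTokenEntero : Prop := ∀ (lexema : String), Dom_estado6ValidoTokenEntero lexema → Spec_estado6ValidoTokenEntero lexema (estado6ValidoTokenEntero lexema)

-- ===== LEMMAS AND PROOFS =====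
-- Once valido is True it stays True: the loop can only break, returning True.
theorem pvLoopA_true (cs : List Char) : pvLoopA cs true = true := by
  induction cs with
  | nil => rfl
  | cons c rest ih => simp [pvLoopA, ih]

-- ===== VERDICT (by name: the statement is the Claim_ definition above) =====
theorem estado6ValidoTokenEntero_spec : Claim_equal_estado6ValidoTokenEntero := by
  intro lexema _
  unfold Spec_estado6ValidoTokenEntero estado6ValidoTokenEntero estado6ValidoTokenEntero_alt
  cases h : lexema.toList with
  | nil => rfl
  | cons c rest =>
      by_cases hd : PySem.Chars.isdigit c = true
      · simp [pvLoopA, hd, pvLoopA_true]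
      · simp [pvLoopA, hd]
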